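-- pv_equiv track=rewrite | github.com/Mahir-o4/DevDraft | app/services/distribution_service.py | _find_best_judge
-- ===== SOURCE A (Python) =====
-- def _find_best_judge(
--     ppt_categories: set,
--     judge_specs:    dict[str, set],
--     judge_load:     dict[str, int],
--     require_match:  bool,
-- ) -> str | None:
--     """
--     Find the best available judge for a PPT.
--
--     If require_match=True  — only consider judges with overlapping specialisations
--     If require_match=False — consider all judges (shortfall fallback)
--
--     Picks the candidate with lowest load.
--     Ties broken by highest specialisation overlap (most relevant judge wins).
--     """
--
--     candidates = []
--
--     for judge_id, specs in judge_specs.items():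
--         overlap = len(specs & ppt_categories)
--
--         if require_match and overlap == 0:
--             continue
--
--         candidates.append({
--             "judge_id": judge_id,
--             "load":     judge_load[judge_id],
--             "overlap":  overlap,
--         })
--
--     if not candidates:
--         return None
--
--     # Sort: load ascending, overlap descending
--     candidates.sort(key=lambda c: (c["load"], -c["overlap"]))
--     return candidates[0]["judge_id"]
-- ===== SOURCE B (Python) =====
-- def _consider(best, judge_id, specs, ppt_categories, judge_load, require_match):
--     """Fold one judge into the running best (lowest load, ties by highest overlap)."""
--     overlap = len(specs & ppt_categories)
--     if require_match and overlap == 0: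
--         return best
--     load = judge_load[judge_id]
--     if best is None or load < best[1] or (load == best[1] and overlap > best[2]):
--         return (judge_id, load, overlap)
--     return best
--
--
-- def _find_best_judge(
--     ppt_categories: set,
--     judge_specs:    dict[str, set],
--     judge_load:     dict[str, int],
--     require_match:  bool,
-- ) -> str | None:
--     # Single pass keeping the running best judge; no candidate list, no sort.
--     best = None
--     for judge_id, specs in judge_specs.items():
--         best = _consider(best, judge_id, specs, ppt_categories, judge_load, require_match)
--     return best[0] if best is not None else None
-- ===== Notes on version B (the rewrite author's own statement) =====
-- stated objective: simpler
-- what changed: Replaced building a candidate list and stable-sorting it by (load, -overlap) with a single pass that maintains the running best judge (lower load wins, on equal load higher overlap wins, first seen kept on ties).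
import Mathlib
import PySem

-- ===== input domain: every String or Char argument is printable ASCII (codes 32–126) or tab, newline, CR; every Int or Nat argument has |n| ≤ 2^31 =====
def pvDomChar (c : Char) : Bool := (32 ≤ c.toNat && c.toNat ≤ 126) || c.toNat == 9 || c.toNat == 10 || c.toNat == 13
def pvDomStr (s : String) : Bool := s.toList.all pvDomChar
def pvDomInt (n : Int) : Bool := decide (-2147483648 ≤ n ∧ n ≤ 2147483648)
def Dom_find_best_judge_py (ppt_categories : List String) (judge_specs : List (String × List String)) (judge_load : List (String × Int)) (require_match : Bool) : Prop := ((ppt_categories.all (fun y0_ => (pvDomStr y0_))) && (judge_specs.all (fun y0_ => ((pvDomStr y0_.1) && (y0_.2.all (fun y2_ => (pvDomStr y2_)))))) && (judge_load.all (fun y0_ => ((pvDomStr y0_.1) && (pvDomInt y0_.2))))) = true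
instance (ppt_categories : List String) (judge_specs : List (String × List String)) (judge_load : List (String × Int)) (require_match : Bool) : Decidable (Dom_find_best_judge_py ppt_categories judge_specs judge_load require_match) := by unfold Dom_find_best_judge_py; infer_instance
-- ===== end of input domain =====

-- B replaces A's candidate-list-plus-stable-sort with a single pass keeping the running best
-- judge (lower load wins, on equal load higher overlap wins, first seen kept on ties): simpler.

-- overlap = len(specs & ppt_categories); shared by both Pythons verbatim
def pvOverlap (ppt_categories : List String) (specs : List String) : Int :=
  PySem.Set.len (PySem.Set.inter (PySem.Set.ofList specs) ppt_categories)

-- ===== PORT A =====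
def find_best_judge_py (ppt_categories : List String) (judge_specs : List (String × List String)) (judge_load : List (String × Int)) (require_match : Bool) : Option String :=
  let candidates : List (String × Int × Int) :=
    judge_specs.foldl (fun acc p =>
      let overlap := pvOverlap ppt_categories p.2
      if require_match && overlap == 0 then acc
      else
        -- judge_load[judge_id]: first-match lookup; exact under Pre_ (the key is present)
        acc ++ [(p.1, (judge_load.lookup p.1).getD 0, overlap)]) []
  if candidates = [] then none
  else
    match PySem.List.sorted2 candidates (fun c => c.2.1) (fun c => -c.2.2) with
    | [] => none
    | c :: _ => some c.1

-- ===== PORT B =====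
-- Source B's helper _consider: fold one judge into the running best
def pvConsider (ppt_categories : List String) (judge_load : List (String × Int)) (require_match : Bool) (best : Option (String × Int × Int)) (p : String × List String) : Option (String × Int × Int) :=
  let overlap := pvOverlap ppt_categories p.2
  if require_match && overlap == 0 then best
  else
    let load := (judge_load.lookup p.1).getD 0
    match best with
    | none => some (p.1, load, overlap)
    | some q =>
      if load < q.2.1 || (load == q.2.1 && decide (overlap > q.2.2)) then some (p.1, load, overlap)
      else some q

def find_best_judge_py_alt (ppt_categories : List String) (judge_specs : List (String × List String)) (judge_load : List (String × Int)) (require_match : Bool) : Option String :=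
  let best : Option (String × Int × Int) :=
    judge_specs.foldl (fun b p => pvConsider ppt_categories judge_load require_match b p) none
  best.map (·.1)

-- ===== PRECONDITION & SPEC =====
-- Pre_ excludes exactly the inputs on which Python A raises KeyError: a judge that survives the
-- require_match filter but is missing from judge_load.
def Pre_find_best_judge_py (ppt_categories : List String) (judge_specs : List (String × List String)) (judge_load : List (String × Int)) (require_match : Bool) : Prop :=
  ∀ p ∈ judge_specs, (require_match = false ∨ pvOverlap ppt_categories p.2 ≠ 0) →
    p.1 ∈ judge_load.map Prod.fst
instance (ppt_categories : List String) (judge_specs : List (String × List String)) (judge_load : List (String × Int)) (require_match : Bool) : Decidable (Pre_find_best_judge_py ppt_categories judge_specs judge_load require_match) := by unfold Pre_find_best_judge_py; infer_instance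
def pvWitness_find_best_judge_py : List String × (List (String × List String)) × (List (String × Int)) × Bool :=
  (["x"], [("j1", ["x", "y"]), ("j2", ["z"])], [("j1", 2), ("j2", 1)], false)
def Spec_find_best_judge_py (ppt_categories : List String) (judge_specs : List (String × List String)) (judge_load : List (String × Int)) (require_match : Bool) (out : Option String) : Prop := out = find_best_judge_py_alt ppt_categories judge_specs judge_load require_match
instance (ppt_categories : List String) (judge_specs : List (String × List String)) (judge_load : List (String × Int)) (require_match : Bool) (out : Option String) : Decidable (Spec_find_best_judge_py ppt_categories judge_specs judge_load require_match out) := by unfold Spec_find_best_judge_py; infer_instance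

-- ===== CLAIM (what is proved, stated in full; the proofs are below) =====
def Claim_equal_find_best_judge_py : Prop := ∀ (ppt_categories : List String) (judge_specs : List (String × List String)) (judge_load : List (String × Int)) (require_match : Bool), Dom_find_best_judge_py ppt_categories judge_specs judge_load require_match → Pre_find_best_judge_py ppt_categories judge_specs judge_load require_match → Spec_find_best_judge_py ppt_categories judge_specs judge_load require_match (find_best_judge_py ppt_categories judge_specs judge_load require_match)

-- ===== LEMMAS AND PROOFS =====

-- the stable-sort comparison on the key (load, -overlap)
def pvLt (c m : String × Int × Int) : Bool :=
  decide (c.2.1 < m.2.1) || (!decide (m.2.1 < c.2.1) && decide (-c.2.2 < -m.2.2))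

-- one step of the running first-minimum
def pvMinStep {α : Type} (before : α → α → Bool) (o : Option α) (x : α) : Option α :=
  match o with
  | none => some x
  | some m => if before x m then some x else some m

theorem pv_head_insertBy {α : Type} (before : α → α → Bool) (x : α) (acc : List α) :
    (PySem.List.insertBy before x acc).head? = pvMinStep before acc.head? x := by
  cases acc <;> simp [PySem.List.insertBy, pvMinStep] <;> split <;> simp

-- head of an insertion-sorted list = running first-minimum over the input
theorem pv_head_foldl_insertBy {α : Type} (before : α → α → Bool) :
    ∀ (xs : List α) (acc : List α),
      (xs.foldl (fun a x => PySem.List.insertBy before x a) acc).head? =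
      xs.foldl (pvMinStep before) acc.head? := by
  intro xs
  induction xs with
  | nil => intro acc; rfl
  | cons x xs ih =>
    intro acc
    simp only [List.foldl_cons, ih (PySem.List.insertBy before x acc), pv_head_insertBy]

-- head of the stable sort by (load, -overlap) = running first-minimum
theorem pv_head_sorted (xs : List (String × Int × Int)) :
    (PySem.List.sorted2 xs (fun c => c.2.1) (fun c => -c.2.2)).head? =
    xs.foldl (pvMinStep pvLt) none := by
  rw [show PySem.List.sorted2 xs (fun c => c.2.1) (fun c => -c.2.2) =
      List.foldl (fun a x => PySem.List.insertBy pvLt x a) [] xs from rfl]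
  have h := pv_head_foldl_insertBy pvLt xs []
  rw [List.head?] at h
  exact h

-- the candidate-building fold appends to its accumulator
theorem pv_afold_acc {α β : Type} (f : List β → α → List β)
    (hf : ∀ acc p, f acc p = acc ++ f [] p) :
    ∀ (js : List α) (acc : List β), js.foldl f acc = acc ++ js.foldl f [] := by
  intro js
  induction js with
  | nil => intro acc; simp
  | cons p js ih =>
    intro acc
    simp only [List.foldl_cons]
    rw [ih (f acc p), ih (f [] p), hf acc p, List.append_assoc]

-- the two strict "better" tests agree
theorem pv_cmp_eq (l ql o qo : Int) :
    (l < ql || (l == ql && decide (qo < o))) =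
    (decide (l < ql) || (!decide (ql < l) && decide (-o < -qo))) := by
  by_cases h1 : l < ql
  · simp [h1]
  · by_cases h2 : l = ql
    · simp [h2, neg_lt_neg_iff]
    · have h3 : ql < l := lt_of_le_of_ne (not_lt.mp h1) fun e => h2 e.symm
      simp [h1, h2, h3]

-- running first-minimum of the candidate list = the single-pass fold of B
theorem pv_key (ppt : List String) (jl : List (String × Int)) (rm : Bool) :
    ∀ (l : List (String × List String)) (b : Option (String × Int × Int)),
      (l.foldl (fun acc p =>
          if rm && pvOverlap ppt p.2 == 0 then acc
          else acc ++ [(p.1, (List.lookup p.1 jl).getD 0, pvOverlap ppt p.2)]) []).foldl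
        (pvMinStep pvLt) b
      = l.foldl (fun b p => pvConsider ppt jl rm b p) b := by
  intro l
  induction l with
  | nil => intro b; rfl
  | cons p l ih =>
    intro b
    rw [List.foldl_cons, List.foldl_cons,
      pv_afold_acc _ (by intro acc q; by_cases h : (rm && pvOverlap ppt q.2 == 0) <;> simp [h]) l,
      List.foldl_append, ih]
    congr 1
    by_cases h : (rm && pvOverlap ppt p.2 == 0)
    · simp [h, pvConsider]
    · simp only [h, Bool.false_eq_true, if_false, List.nil_append, List.foldl_cons, List.foldl_nil,
        pvConsider]
    <;> cases b with
      | none => rfl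
      | some q =>
        simp only [pvMinStep, pvLt]
        simp only [← pv_cmp_eq]

theorem find_best_judge_py_spec : Claim_equal_find_best_judge_py := by
  intro ppt js jl rm _ _
  unfold Spec_find_best_judge_py find_best_judge_py find_best_judge_py_alt
  dsimp only
  cases hc : js.foldl (fun acc p =>
      if rm && pvOverlap ppt p.2 == 0 then acc
      else acc ++ [(p.1, (List.lookup p.1 jl).getD 0, pvOverlap ppt p.2)]) [] with
  | nil =>
    rw [← pv_key ppt jl rm js none, hc]
    simp
  | cons c cs =>
    rw [← pv_key ppt jl rm js none, hc, ← pv_head_sorted (c :: cs)]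
    cases hs : PySem.List.sorted2 (c :: cs) (fun c => c.2.1) (fun c => -c.2.2) with
    | nil =>
      have hp := PySem.List.sorted2_perm (c :: cs) (fun c => c.2.1) (fun c => -c.2.2) false
      rw [hs] at hp
      exact absurd hp.symm.eq_nil (by simp)
    | cons c' t => simp
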